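-- pv_equiv track=rewrite | github.com/AlexisWolfWaisman/CodeFights-spanish | intro/LacostaDelOceano/matrixElementSum.py | matrixElementsSum
-- ===== SOURCE A (Python) =====
-- def matrixElementsSum(matrix):
--     i = len(matrix)
--     j = len(matrix[0])
--     total = 0
--     for y in range(0, j):
--         vector = []
--         for x in range(0,i):
--             vector.append(matrix[x][y])
--         for elem in vector:
--             if elem == 0:
--                 break
--             else:
--                 total += elem
--     return total
-- ===== SOURCE B (Python) =====
-- def matrixElementsSum(matrix):
--     cols = len(matrix[0])
--     blocked = [False] * cols
--     total = 0
--     for row in matrix: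
--         for y in range(cols):
--             if not blocked[y]:
--                 v = row[y]
--                 if v == 0:
--                     blocked[y] = True
--                 else:
--                     total += v
--     return total
-- ===== Notes on version B (the rewrite author's own statement) =====
-- stated objective: alternative
-- what changed: Replaces A's column-major triple loop (materialise each column as a list, then sum it until a zero) with a single row-major pass maintaining a blocked-columns boolean array and a running total; no intermediate column lists are built.
import Mathlib
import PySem

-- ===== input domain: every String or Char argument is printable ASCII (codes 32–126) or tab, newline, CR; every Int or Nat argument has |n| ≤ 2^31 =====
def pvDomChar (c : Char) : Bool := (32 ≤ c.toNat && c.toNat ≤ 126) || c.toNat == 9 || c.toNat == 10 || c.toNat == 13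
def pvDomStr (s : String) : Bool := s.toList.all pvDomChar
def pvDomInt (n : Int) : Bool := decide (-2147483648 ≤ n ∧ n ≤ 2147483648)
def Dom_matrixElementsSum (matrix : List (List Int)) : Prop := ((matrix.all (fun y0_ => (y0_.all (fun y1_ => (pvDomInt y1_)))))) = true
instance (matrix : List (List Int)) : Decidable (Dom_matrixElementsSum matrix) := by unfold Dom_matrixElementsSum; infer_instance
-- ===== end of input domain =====

-- B replaces the column-major triple loop by one row-major pass with a blocked-columns
-- boolean array (alternative decomposition, same asymptotic cost).

-- ===== PORT A =====
-- the 'for elem in vector: if elem == 0: break else: total += elem' loop of A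
def pvSumBreak (vector : List Int) (total : Int) : Int :=
  match vector with
  | [] => total
  | e :: rest => if e = 0 then total else pvSumBreak rest (total + e)

def matrixElementsSum (matrix : List (List Int)) : Int :=
  let i : Int := matrix.length
  let j : Int := ((PySem.List.pyGetD matrix 0 []).length : Int)
  (PySem.List.pyRange 0 j 1).foldl (fun total y =>
    let vector := (PySem.List.pyRange 0 i 1).foldl
      (fun v x => v ++ [PySem.List.pyGetD (PySem.List.pyGetD matrix x []) y 0]) []
    pvSumBreak vector total) 0

-- ===== PORT B =====
-- one y-step of B's inner loop over the current row (indices are in range under Pre_,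
-- so getD is exact for Python's blocked[y] / row[y])
def pvRowStep (row : List Int) (st : List Bool × Int) (y : Nat) : List Bool × Int :=
  if st.1.getD y true then st
  else if row.getD y 0 = 0 then (st.1.set y true, st.2)
  else (st.1, st.2 + row.getD y 0)

def matrixElementsSum_alt (matrix : List (List Int)) : Int :=
  let cols := (PySem.List.pyGetD matrix 0 []).length
  (matrix.foldl (fun st row => (List.range cols).foldl (pvRowStep row) st)
    (List.replicate cols false, 0)).2

-- ===== PRECONDITION & SPEC =====
-- exactly the inputs where Python A returns: a nonempty matrix whose every row has at
-- least len(matrix[0]) entries (otherwise matrix[0] / matrix[x][y] raises IndexError)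
def Pre_matrixElementsSum (matrix : List (List Int)) : Prop :=
  matrix ≠ [] ∧ ∀ row ∈ matrix, (matrix.headD []).length ≤ row.length
instance (matrix : List (List Int)) : Decidable (Pre_matrixElementsSum matrix) := by
  unfold Pre_matrixElementsSum; infer_instance

def pvWitness_matrixElementsSum : List (List Int) := [[1, 2], [0, 3]]

def Spec_matrixElementsSum (matrix : List (List Int)) (out : Int) : Prop := out = matrixElementsSum_alt matrix
instance (matrix : List (List Int)) (out : Int) : Decidable (Spec_matrixElementsSum matrix out) := by unfold Spec_matrixElementsSum; infer_instance

-- ===== CLAIM (what is proved, stated in full; the proofs are below) =====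
def Claim_equal_matrixElementsSum : Prop := ∀ (matrix : List (List Int)), Dom_matrixElementsSum matrix → Pre_matrixElementsSum matrix → Spec_matrixElementsSum matrix (matrixElementsSum matrix)

-- ===== LEMMAS AND PROOFS =====

-- the zero-truncated sum of a column
def pvSB (v : List Int) : Int :=
  match v with
  | [] => 0
  | e :: rest => if e = 0 then 0 else e + pvSB rest

-- column y of the remaining rows
def pvCol (rem : List (List Int)) (y : Nat) : List Int := rem.map (fun row => row.getD y 0)

-- what B still owes: the truncated sums of the not-yet-blocked columns
def pvS (cols : Nat) (rem : List (List Int)) (b : List Bool) : Int :=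
  ((List.range cols).map (fun y => if b.getD y true then 0 else pvSB (pvCol rem y))).sum

theorem pvSumBreak_eq (v : List Int) (t : Int) : pvSumBreak v t = t + pvSB v := by
  induction v generalizing t with
  | nil => simp [pvSumBreak, pvSB]
  | cons e rest ih =>
    simp only [pvSumBreak, pvSB]
    split_ifs with h
    · simp
    · rw [ih]; ring

theorem pvRowStep_fst_length (row : List Int) (st : List Bool × Int) (y : Nat) :
    (pvRowStep row st y).1.length = st.1.length := by
  unfold pvRowStep; split_ifs <;> simp

theorem pvRowStep_fst_getD_ne (row : List Int) (st : List Bool × Int) (y z : Nat)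
    (h : z ≠ y) : (pvRowStep row st y).1.getD z true = st.1.getD z true := by
  unfold pvRowStep; split_ifs <;> simp [List.getD, List.getElem?_set_ne (Ne.symm h)]

-- inner loop over a nodup list of in-range column indices: blocked flags outside the
-- list are untouched, the length is kept, and total plus the owed sums is preserved
theorem pvInner (row : List Int) (rest : List (List Int)) (ys : List Nat)
    (hnd : ys.Nodup) (b : List Bool) (t : Int) (hy : ∀ y ∈ ys, y < b.length) :
    (∀ z, z ∉ ys → (ys.foldl (pvRowStep row) (b, t)).1.getD z true = b.getD z true) ∧
    (ys.foldl (pvRowStep row) (b, t)).1.length = b.length ∧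
    (ys.foldl (pvRowStep row) (b, t)).2 +
      (ys.map (fun y => if (ys.foldl (pvRowStep row) (b, t)).1.getD y true then 0
        else pvSB (pvCol rest y))).sum
      = t + (ys.map (fun y => if b.getD y true then 0
        else pvSB (row.getD y 0 :: pvCol rest y))).sum := by
  induction ys generalizing b t with
  | nil => simp
  | cons y ys ih =>
    simp only [List.nodup_cons] at hnd
    have hylen : y < b.length := hy y (by simp)
    have hstep : ∀ z, z ≠ y → (pvRowStep row (b, t) y).1.getD z true = b.getD z true :=
      fun z hz => pvRowStep_fst_getD_ne row (b, t) y z hz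
    have hlen1 : (pvRowStep row (b, t) y).1.length = b.length :=
      pvRowStep_fst_length row (b, t) y
    obtain ⟨ihout, ihlen, ihsum⟩ := ih hnd.2 (pvRowStep row (b, t) y).1 (pvRowStep row (b, t) y).2
      (fun z hz => hlen1 ▸ hy z (by simp [hz]))
    simp only [List.foldl_cons]
    refine ⟨?_, ?_, ?_⟩
    · intro z hz
      simp only [List.mem_cons, not_or] at hz
      rw [ihout z hz.2, hstep z hz.1]
    · rw [ihlen, hlen1]
    · -- head term of the left sum: the final blocked value at y equals its value after the step
      have hyfin : (ys.foldl (pvRowStep row) ((pvRowStep row (b, t) y).1, (pvRowStep row (b, t) y).2)).1.getD y true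
          = (pvRowStep row (b, t) y).1.getD y true := ihout y hnd.1
      -- the tail sums on the right agree whether we read b or the stepped blocked list
      have htail : (ys.map (fun z => if (pvRowStep row (b, t) y).1.getD z true then 0
            else pvSB (row.getD z 0 :: pvCol rest z))).sum
          = (ys.map (fun z => if b.getD z true then 0
            else pvSB (row.getD z 0 :: pvCol rest z))).sum := by
        apply congrArg List.sum
        apply List.map_congr_left
        intro z hz
        rw [hstep z (fun h => hnd.1 (h ▸ hz))]
      have hst : (ys.foldl (pvRowStep row) (pvRowStep row (b, t) y)) =
          (ys.foldl (pvRowStep row) ((pvRowStep row (b, t) y).1, (pvRowStep row (b, t) y).2)) := by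
        rfl
      simp only [List.map_cons, List.sum_cons, hst, hyfin]
      -- one step at y preserves t + its own owed term
      have hkey : (pvRowStep row (b, t) y).2 +
          (if (pvRowStep row (b, t) y).1.getD y true then 0 else pvSB (pvCol rest y))
          = t + (if b.getD y true then 0 else pvSB (row.getD y 0 :: pvCol rest y)) := by
        unfold pvRowStep
        simp only [List.getD_eq_getElem?_getD]
        by_cases hb : b[y]?.getD true = true
        · simp [hb]
        · by_cases hz : row[y]?.getD 0 = 0
          · simp [hb, hz, pvSB, List.getElem?_set_self hylen]
          · simp [hb, hz, pvSB]
            ring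
      calc (ys.foldl (pvRowStep row) ((pvRowStep row (b, t) y).1, (pvRowStep row (b, t) y).2)).2 +
            ((if (pvRowStep row (b, t) y).1.getD y true then 0 else pvSB (pvCol rest y)) +
             (ys.map (fun z => if (ys.foldl (pvRowStep row) ((pvRowStep row (b, t) y).1, (pvRowStep row (b, t) y).2)).1.getD z true then 0
               else pvSB (pvCol rest z))).sum)
          = ((ys.foldl (pvRowStep row) ((pvRowStep row (b, t) y).1, (pvRowStep row (b, t) y).2)).2 +
             (ys.map (fun z => if (ys.foldl (pvRowStep row) ((pvRowStep row (b, t) y).1, (pvRowStep row (b, t) y).2)).1.getD z true then 0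
               else pvSB (pvCol rest z))).sum) +
            (if (pvRowStep row (b, t) y).1.getD y true then 0 else pvSB (pvCol rest y)) := by ring
        _ = ((pvRowStep row (b, t) y).2 +
             (ys.map (fun z => if (pvRowStep row (b, t) y).1.getD z true then 0
               else pvSB (row.getD z 0 :: pvCol rest z))).sum) +
            (if (pvRowStep row (b, t) y).1.getD y true then 0 else pvSB (pvCol rest y)) := by rw [ihsum]
        _ = t + ((if b.getD y true then 0 else pvSB (row.getD y 0 :: pvCol rest y)) +
            (ys.map (fun z => if b.getD z true then 0 else pvSB (row.getD z 0 :: pvCol rest z))).sum) := by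
            rw [htail]; rw [add_comm ((pvRowStep row (b,t) y).2) _, add_assoc, hkey]; ring

-- the whole row loop of B computes t plus the owed column sums
theorem pvRows (cols : Nat) (rem : List (List Int)) (b : List Bool) (t : Int)
    (hb : b.length = cols) :
    (rem.foldl (fun st row => (List.range cols).foldl (pvRowStep row) st) (b, t)).2
      = t + pvS cols rem b := by
  induction rem generalizing b t with
  | nil =>
    simp only [List.foldl_nil]
    have : pvS cols [] b = 0 := by
      unfold pvS
      have : ∀ y ∈ List.range cols, (if b.getD y true then 0 else pvSB (pvCol [] y)) = (0 : Int) := by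
        intro y _; simp [pvCol, pvSB]
      rw [List.map_congr_left this]
      simp
    rw [this]; ring
  | cons row rest ih =>
    simp only [List.foldl_cons]
    obtain ⟨hout, hlen, hsum⟩ := pvInner row rest (List.range cols) (List.nodup_range)
      b t (by intro y hy; rw [hb]; exact List.mem_range.mp hy)
    set st' := (List.range cols).foldl (pvRowStep row) (b, t) with hst'
    rw [ih st'.1 st'.2 (by rw [hlen, hb]) ]
    unfold pvS
    have hcol : ∀ y ∈ List.range cols,
        (if b.getD y true then 0 else pvSB (pvCol (row :: rest) y))
        = (if b.getD y true then 0 else pvSB (row.getD y 0 :: pvCol rest y)) := by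
      intro y _; simp [pvCol]
    rw [List.map_congr_left hcol]
    omega

-- B equals the sum over all columns of their zero-truncated sums
theorem pvAlt_eq (matrix : List (List Int)) :
    matrixElementsSum_alt matrix
      = ((List.range (PySem.List.pyGetD matrix 0 []).length).map
          (fun y => pvSB (pvCol matrix y))).sum := by
  unfold matrixElementsSum_alt
  set cols := (PySem.List.pyGetD matrix 0 []).length with hcols
  rw [pvRows cols matrix (List.replicate cols false) 0 (by simp)]
  unfold pvS
  have hmap : (List.range cols).map
        (fun y => if (List.replicate cols false).getD y true then 0 else pvSB (pvCol matrix y))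
      = (List.range cols).map (fun y => pvSB (pvCol matrix y)) := by
    apply List.map_congr_left
    intro y hy
    have h1 : (List.replicate cols false).getD y true = false := by
      rw [List.getD, List.getElem?_replicate]
      simp [List.mem_range.mp hy]
    rw [h1]
    simp
  rw [hmap]
  ring

-- A equals the same sum
theorem pvA_eq (matrix : List (List Int)) :
    matrixElementsSum matrix
      = ((List.range (PySem.List.pyGetD matrix 0 []).length).map
          (fun y => pvSB (pvCol matrix y))).sum := by
  unfold matrixElementsSum
  simp only []
  set cols := (PySem.List.pyGetD matrix 0 []).length with hcols
  -- the inner append loop builds exactly column y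
  have hvec : ∀ y : Int, 0 ≤ y →
      (PySem.List.pyRange 0 (matrix.length : Int) 1).foldl
        (fun v x => v ++ [PySem.List.pyGetD (PySem.List.pyGetD matrix x []) y 0]) []
      = matrix.map (fun row => PySem.List.pyGetD row y 0) := by
    intro y _
    rw [PySem.List.foldl_append_singleton_eq_map]
    have := PySem.List.map_pyGetD_pyRange_zero' matrix ([] : List Int)
    calc (PySem.List.pyRange 0 (matrix.length : Int) 1).map
          (fun x => PySem.List.pyGetD (PySem.List.pyGetD matrix x []) y 0)
        = ((PySem.List.pyRange 0 (matrix.length : Int) 1).map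
            (fun x => PySem.List.pyGetD matrix x [])).map (fun row => PySem.List.pyGetD row y 0) := by
          rw [List.map_map]; rfl
      _ = matrix.map (fun row => PySem.List.pyGetD row y 0) := by rw [this]
  -- rewrite the outer range as mapped Nats
  rw [show ((cols : Int)) = ((cols : Nat) : Int) from rfl]
  rw [PySem.List.pyRange_one 0 (cols : Int)]
  simp only [sub_zero, Int.toNat_natCast, zero_add]
  rw [List.foldl_map]
  have hbody : ∀ (t : Int) (k : Nat), k ∈ List.range cols →
      pvSumBreak ((PySem.List.pyRange 0 (matrix.length : Int) 1).foldl
          (fun v x => v ++ [PySem.List.pyGetD (PySem.List.pyGetD matrix x []) (k : Int) 0]) []) t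
      = t + pvSB (pvCol matrix k) := by
    intro t k _
    rw [hvec (k : Int) (by positivity), pvSumBreak_eq]
    have hc : matrix.map (fun row => PySem.List.pyGetD row (k : Int) 0) = pvCol matrix k := by
      unfold pvCol
      apply List.map_congr_left
      intro row _
      simp [PySem.List.pyGetD_natCast]
    rw [hc]
  have hfold := PySem.List.foldl_congr_mem (l := List.range cols) (init := (0 : Int))
    (f := fun x y => pvSumBreak ((PySem.List.pyRange 0 (matrix.length : Int) 1).foldl
      (fun v x => v ++ [PySem.List.pyGetD (PySem.List.pyGetD matrix x []) (y : Int) 0]) []) x)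
    (g := fun t y => t + pvSB (pvCol matrix y))
    (fun t k hk => hbody t k hk)
  rw [hfold, PySem.List.foldl_add]
  simp

-- ===== VERDICT (by name: the statement is the Claim_ definition above) =====
theorem matrixElementsSum_spec : Claim_equal_matrixElementsSum := by
  intro matrix _ _
  unfold Spec_matrixElementsSum
  rw [pvA_eq, pvAlt_eq]
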